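-- pv_equiv track=rewrite | github.com/efrenmo/docker-airflow-metrics-data-pipeline | dags/modules/scraped_listings_clean_up.py | type_function
-- ===== SOURCE A (Python) =====
-- allowed_types = {"Unisex Watches, Men's Watches, Women's Watches": ["men/women",
--                                                                     "mens/womens watch",
--                                                                     "mens/womens watches",
--                                                                     "Men's watch/Unisex",
--                                                                     "unisex",
--                                                                     "unisex watch",
--                                                                     "unisex watches",
--                                                                     "Unisex's Watches",
--                                                                    "Women's Watches, Men's Watches"],
--                     "Women's Watches": ["lady", "ladies", "ladys", "women", "Female", "Women's watch"],
--                     "Men's Watches": ["Mens",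
--                                       "Men",
--                                       "Mens Watch",
--                                       "Mens Watches",
--                                       "Men's",
--                                       "gent",
--                                       "gents",
--                                       "Male"],
--                     "Pocket Watches": ["pocket watch", "FOB watch", "fob watch", "pocket"],
--                     "Other / Clock": ["clock", "clocks"]
--                     }
--
-- def type_function(_type):
--     try:
--         _type = [val for val in allowed_types if _type.lower().strip()==val.lower().strip()][0]
--         if _type:
--             return _type
--     except:
--         for k, v in allowed_types.items():
--             for value in v:
--                 if _type.lower().strip()==value.lower().strip():
--                     return k
--     return ''
-- ===== SOURCE B (Python) =====
-- # A flat, precomputed normalized-string -> canonical-category table (first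
-- # occurrence wins, key before its variants, exactly A's precedence), so the
-- # function is a single dict lookup with no scanning.
-- _CANON = {
--     "unisex watches, men's watches, women's watches": "Unisex Watches, Men's Watches, Women's Watches",
--     "men/women": "Unisex Watches, Men's Watches, Women's Watches",
--     "mens/womens watch": "Unisex Watches, Men's Watches, Women's Watches",
--     "mens/womens watches": "Unisex Watches, Men's Watches, Women's Watches",
--     "men's watch/unisex": "Unisex Watches, Men's Watches, Women's Watches",
--     "unisex": "Unisex Watches, Men's Watches, Women's Watches",
--     "unisex watch": "Unisex Watches, Men's Watches, Women's Watches",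
--     "unisex watches": "Unisex Watches, Men's Watches, Women's Watches",
--     "unisex's watches": "Unisex Watches, Men's Watches, Women's Watches",
--     "women's watches, men's watches": "Unisex Watches, Men's Watches, Women's Watches",
--     "women's watches": "Women's Watches",
--     "lady": "Women's Watches",
--     "ladies": "Women's Watches",
--     "ladys": "Women's Watches",
--     "women": "Women's Watches",
--     "female": "Women's Watches",
--     "women's watch": "Women's Watches",
--     "men's watches": "Men's Watches",
--     "mens": "Men's Watches",
--     "men": "Men's Watches",
--     "mens watch": "Men's Watches",
--     "mens watches": "Men's Watches",
--     "men's": "Men's Watches",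
--     "gent": "Men's Watches",
--     "gents": "Men's Watches",
--     "male": "Men's Watches",
--     "pocket watches": "Pocket Watches",
--     "pocket watch": "Pocket Watches",
--     "fob watch": "Pocket Watches",
--     "pocket": "Pocket Watches",
--     "other / clock": "Other / Clock",
--     "clock": "Other / Clock",
--     "clocks": "Other / Clock",
-- }
--
-- def type_function(_type):
--     return _CANON.get(_type.lower().strip(), '')
-- ===== Notes on version B (the rewrite author's own statement) =====
-- stated objective: faster
-- what changed: A's per-call try/except with a two-phase nested scan over the keys and every variant list is replaced by one flat precomputed normalized->canonical lookup dict and a single .get, with A's key-before-variant precedence folded into the table.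
import Mathlib
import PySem

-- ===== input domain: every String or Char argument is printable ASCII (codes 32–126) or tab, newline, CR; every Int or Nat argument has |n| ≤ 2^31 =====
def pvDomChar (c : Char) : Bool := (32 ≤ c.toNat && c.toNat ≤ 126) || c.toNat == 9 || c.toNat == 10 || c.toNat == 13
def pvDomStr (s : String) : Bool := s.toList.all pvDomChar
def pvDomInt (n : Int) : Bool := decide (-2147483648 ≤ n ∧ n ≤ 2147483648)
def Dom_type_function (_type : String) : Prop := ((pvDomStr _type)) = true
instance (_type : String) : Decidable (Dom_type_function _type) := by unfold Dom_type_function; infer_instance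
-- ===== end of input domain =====

-- B replaces A's per-call try/except two-phase nested scan by a single lookup in a flat
-- precomputed normalized->canonical dict (A's key-before-variant precedence baked into the table).

-- `s.lower().strip()` normalization both Pythons apply
def normOf (s : String) : String := PySem.Str.strip (PySem.Str.lower s)

-- ===== PORT A =====
-- the module-level nested table A scans
def allowedTypes : List (String × List String) := [
  ("Unisex Watches, Men's Watches, Women's Watches", ["men/women", "mens/womens watch", "mens/womens watches", "Men's watch/Unisex", "unisex", "unisex watch", "unisex watches", "Unisex's Watches", "Women's Watches, Men's Watches"]),
  ("Women's Watches", ["lady", "ladies", "ladys", "women", "Female", "Women's watch"]),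
  ("Men's Watches", ["Mens", "Men", "Mens Watch", "Mens Watches", "Men's", "gent", "gents", "Male"]),
  ("Pocket Watches", ["pocket watch", "FOB watch", "fob watch", "pocket"]),
  ("Other / Clock", ["clock", "clocks"])
]

-- the except-branch: for k, v in allowed_types.items(): for value in v: if norm == value.lower().strip(): return k
def scanVariants : List (String × List String) → String → String
  | [], _ => ""
  | (k, vs) :: rest, n => if vs.any (fun v => n == normOf v) then k else scanVariants rest n

def type_function (_type : String) : String :=
  let n := normOf _type
  match ((allowedTypes.map Prod.fst).filter (fun k => n == normOf k)).head? with
  | some k => if k == "" then "" else k   -- `if _type: return _type`, else falls through to `return ''`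
  | none => scanVariants allowedTypes n   -- IndexError caught by the bare except

-- ===== PORT B =====
-- the flat precomputed dict literal _CANON of Source B
def canonTable : PySem.Dict String String := PySem.Dict.mk [
  ("unisex watches, men's watches, women's watches", "Unisex Watches, Men's Watches, Women's Watches"),
  ("men/women", "Unisex Watches, Men's Watches, Women's Watches"),
  ("mens/womens watch", "Unisex Watches, Men's Watches, Women's Watches"),
  ("mens/womens watches", "Unisex Watches, Men's Watches, Women's Watches"),
  ("men's watch/unisex", "Unisex Watches, Men's Watches, Women's Watches"),
  ("unisex", "Unisex Watches, Men's Watches, Women's Watches"),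
  ("unisex watch", "Unisex Watches, Men's Watches, Women's Watches"),
  ("unisex watches", "Unisex Watches, Men's Watches, Women's Watches"),
  ("unisex's watches", "Unisex Watches, Men's Watches, Women's Watches"),
  ("women's watches, men's watches", "Unisex Watches, Men's Watches, Women's Watches"),
  ("women's watches", "Women's Watches"),
  ("lady", "Women's Watches"),
  ("ladies", "Women's Watches"),
  ("ladys", "Women's Watches"),
  ("women", "Women's Watches"),
  ("female", "Women's Watches"),
  ("women's watch", "Women's Watches"),
  ("men's watches", "Men's Watches"),
  ("mens", "Men's Watches"),
  ("men", "Men's Watches"),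
  ("mens watch", "Men's Watches"),
  ("mens watches", "Men's Watches"),
  ("men's", "Men's Watches"),
  ("gent", "Men's Watches"),
  ("gents", "Men's Watches"),
  ("male", "Men's Watches"),
  ("pocket watches", "Pocket Watches"),
  ("pocket watch", "Pocket Watches"),
  ("fob watch", "Pocket Watches"),
  ("pocket", "Pocket Watches"),
  ("other / clock", "Other / Clock"),
  ("clock", "Other / Clock"),
  ("clocks", "Other / Clock")
]

def type_function_alt (_type : String) : String :=
  canonTable.getD (normOf _type) ""

-- ===== PRECONDITION & SPEC =====
def Spec_type_function (_type : String) (out : String) : Prop := out = type_function_alt _type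
instance (_type : String) (out : String) : Decidable (Spec_type_function _type out) := by unfold Spec_type_function; infer_instance

-- ===== CLAIM (what is proved, stated in full; the proofs are below) =====
def Claim_equal_type_function : Prop := ∀ (_type : String), Dom_type_function _type → Spec_type_function _type (type_function _type)

-- ===== LEMMAS AND PROOFS =====
set_option maxRecDepth 16384
set_option maxHeartbeats 2000000
-- the distinct normalized strings occurring in the table (= canonTable.keys)
def Klit : List String := ["unisex watches, men's watches, women's watches", "men/women", "mens/womens watch", "mens/womens watches", "men's watch/unisex", "unisex", "unisex watch", "unisex watches", "unisex's watches", "women's watches, men's watches", "women's watches", "lady", "ladies", "ladys", "women", "female", "women's watch", "men's watches", "mens", "men", "mens watch", "mens watches", "men's", "gent", "gents", "male", "pocket watches", "pocket watch", "fob watch", "pocket", "other / clock", "clock", "clocks"]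

theorem nk0 : normOf "Unisex Watches, Men's Watches, Women's Watches" = "unisex watches, men's watches, women's watches" := rfl
theorem nk1 : normOf "men/women" = "men/women" := rfl
theorem nk2 : normOf "mens/womens watch" = "mens/womens watch" := rfl
theorem nk3 : normOf "mens/womens watches" = "mens/womens watches" := rfl
theorem nk4 : normOf "Men's watch/Unisex" = "men's watch/unisex" := rfl
theorem nk5 : normOf "unisex" = "unisex" := rfl
theorem nk6 : normOf "unisex watch" = "unisex watch" := rfl
theorem nk7 : normOf "unisex watches" = "unisex watches" := rfl
theorem nk8 : normOf "Unisex's Watches" = "unisex's watches" := rfl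
theorem nk9 : normOf "Women's Watches, Men's Watches" = "women's watches, men's watches" := rfl
theorem nk10 : normOf "Women's Watches" = "women's watches" := rfl
theorem nk11 : normOf "lady" = "lady" := rfl
theorem nk12 : normOf "ladies" = "ladies" := rfl
theorem nk13 : normOf "ladys" = "ladys" := rfl
theorem nk14 : normOf "women" = "women" := rfl
theorem nk15 : normOf "Female" = "female" := rfl
theorem nk16 : normOf "Women's watch" = "women's watch" := rfl
theorem nk17 : normOf "Men's Watches" = "men's watches" := rfl
theorem nk18 : normOf "Mens" = "mens" := rfl
theorem nk19 : normOf "Men" = "men" := rfl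
theorem nk20 : normOf "Mens Watch" = "mens watch" := rfl
theorem nk21 : normOf "Mens Watches" = "mens watches" := rfl
theorem nk22 : normOf "Men's" = "men's" := rfl
theorem nk23 : normOf "gent" = "gent" := rfl
theorem nk24 : normOf "gents" = "gents" := rfl
theorem nk25 : normOf "Male" = "male" := rfl
theorem nk26 : normOf "Pocket Watches" = "pocket watches" := rfl
theorem nk27 : normOf "pocket watch" = "pocket watch" := rfl
theorem nk28 : normOf "FOB watch" = "fob watch" := rfl
theorem nk29 : normOf "fob watch" = "fob watch" := rfl
theorem nk30 : normOf "pocket" = "pocket" := rfl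
theorem nk31 : normOf "Other / Clock" = "other / clock" := rfl
theorem nk32 : normOf "clock" = "clock" := rfl
theorem nk33 : normOf "clocks" = "clocks" := rfl

theorem keys_canonTable : canonTable.keys = Klit := by decide

theorem core_eq (n : String) :
    (match ((allowedTypes.map Prod.fst).filter (fun k => n == normOf k)).head? with
     | some k => if k == "" then "" else k
     | none => scanVariants allowedTypes n) = canonTable.getD n "" := by
  by_cases hn : n ∈ Klit
  · fin_cases hn <;> decide
  · simp only [Klit, List.mem_cons, List.not_mem_nil, or_false, not_or] at hn
    obtain ⟨h0, h1, h2, h3, h4, h5, h6, h7, h8, h9, h10, h11, h12, h13, h14, h15, h16, h17, h18, h19, h20, h21, h22, h23, h24, h25, h26, h27, h28, h29, h30, h31, h32⟩ := hn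
    have hc : canonTable.contains n = false := by
      rw [PySem.Dict.contains_eq_decide_mem_keys, keys_canonTable]
      simp [Klit, h0, h1, h2, h3, h4, h5, h6, h7, h8, h9, h10, h11, h12, h13, h14, h15, h16, h17, h18, h19, h20, h21, h22, h23, h24, h25, h26, h27, h28, h29, h30, h31, h32]
    rw [PySem.Dict.getD_of_not_contains _ _ hc]
    have e0 : (n == "unisex watches, men's watches, women's watches") = false := by simp [h0]
    have e1 : (n == "men/women") = false := by simp [h1]
    have e2 : (n == "mens/womens watch") = false := by simp [h2]
    have e3 : (n == "mens/womens watches") = false := by simp [h3]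
    have e4 : (n == "men's watch/unisex") = false := by simp [h4]
    have e5 : (n == "unisex") = false := by simp [h5]
    have e6 : (n == "unisex watch") = false := by simp [h6]
    have e7 : (n == "unisex watches") = false := by simp [h7]
    have e8 : (n == "unisex's watches") = false := by simp [h8]
    have e9 : (n == "women's watches, men's watches") = false := by simp [h9]
    have e10 : (n == "women's watches") = false := by simp [h10]
    have e11 : (n == "lady") = false := by simp [h11]
    have e12 : (n == "ladies") = false := by simp [h12]
    have e13 : (n == "ladys") = false := by simp [h13]
    have e14 : (n == "women") = false := by simp [h14]
    have e15 : (n == "female") = false := by simp [h15]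
    have e16 : (n == "women's watch") = false := by simp [h16]
    have e17 : (n == "men's watches") = false := by simp [h17]
    have e18 : (n == "mens") = false := by simp [h18]
    have e19 : (n == "men") = false := by simp [h19]
    have e20 : (n == "mens watch") = false := by simp [h20]
    have e21 : (n == "mens watches") = false := by simp [h21]
    have e22 : (n == "men's") = false := by simp [h22]
    have e23 : (n == "gent") = false := by simp [h23]
    have e24 : (n == "gents") = false := by simp [h24]
    have e25 : (n == "male") = false := by simp [h25]
    have e26 : (n == "pocket watches") = false := by simp [h26]
    have e27 : (n == "pocket watch") = false := by simp [h27]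
    have e28 : (n == "fob watch") = false := by simp [h28]
    have e29 : (n == "pocket") = false := by simp [h29]
    have e30 : (n == "other / clock") = false := by simp [h30]
    have e31 : (n == "clock") = false := by simp [h31]
    have e32 : (n == "clocks") = false := by simp [h32]
    simp [allowedTypes, scanVariants, List.filter, nk0, nk1, nk2, nk3, nk4, nk5, nk6, nk7, nk8, nk9, nk10, nk11, nk12, nk13, nk14, nk15, nk16, nk17, nk18, nk19, nk20, nk21, nk22, nk23, nk24, nk25, nk26, nk27, nk28, nk29, nk30, nk31, nk32, nk33, e0, e1, e2, e3, e4, e5, e6, e7, e8, e9, e10, e11, e12, e13, e14, e15, e16, e17, e18, e19, e20, e21, e22, e23, e24, e25, e26, e27, e28, e29, e30, e31, e32]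

-- ===== VERDICT (by name: the statement is the Claim_ definition above) =====
theorem type_function_spec : Claim_equal_type_function := by
  intro t _
  unfold Spec_type_function type_function type_function_alt
  exact core_eq (normOf t)
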